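-- pv_equiv track=rewrite | github.com/mlnotes2718/5m-data-1.1-intro-data-science | assignment.py | count_repeats
-- ===== SOURCE A (Python) =====
-- def count_repeats(string):
--     """Returns the number of repeated characters in a string.
--     >>> count_repeats("hello")
--     2
--     >>> count_repeats("aeiou")
--     0
--     """
--     """
--     Thomas Tay Note:
--     The test example above did not consider multiple repeated characters such as "heello"
--     Will interpret the requirement as below:
--     - Count repeated characters for each character.
--     - If a character is repeated more than once, count as 1.
--     - Store all chracters and its count in a dictionary.
--     - Will return the count of the character that is repeated the most.
--     """
--     repeated_dic = {}
--     most_repeated_count = 0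
--     # Count each chracter and store the counts in a dictionary
--     for each_character in string:
--         if each_character in repeated_dic:
--             repeated_dic[each_character] += 1
--         else:
--             repeated_dic[each_character] = 1
--
--     # Find the character count that is repeated the most
--     for key,value in repeated_dic.items():
--         if value > 1:
--             if value > most_repeated_count:
--                 most_repeated_count = value
--
--     return most_repeated_count
-- ===== SOURCE B (Python) =====
-- def count_repeats(string):
--     best = 0
--     run = 0
--     prev = None
--     for ch in sorted(string):
--         if prev == ch:
--             run += 1
--         else:
--             run = 1
--             prev = ch
--         if run > best:
--             best = run
--     return best if best > 1 else 0
-- ===== Notes on version B (the rewrite author's own statement) =====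
-- stated objective: alternative
-- what changed: Replaces the frequency dictionary plus a second pass over its items with a sort followed by a single run-length scan that keeps the longest run of equal characters.
import Mathlib
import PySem

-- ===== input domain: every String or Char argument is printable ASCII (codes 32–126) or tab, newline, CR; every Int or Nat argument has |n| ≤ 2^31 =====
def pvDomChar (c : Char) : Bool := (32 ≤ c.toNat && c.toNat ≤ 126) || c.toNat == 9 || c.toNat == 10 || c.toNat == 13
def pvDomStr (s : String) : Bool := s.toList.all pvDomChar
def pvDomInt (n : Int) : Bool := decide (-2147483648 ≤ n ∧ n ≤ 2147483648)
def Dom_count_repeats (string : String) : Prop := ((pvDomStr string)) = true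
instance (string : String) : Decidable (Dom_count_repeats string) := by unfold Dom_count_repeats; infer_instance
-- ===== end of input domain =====

-- B replaces A's frequency dictionary and second pass with a sort plus one run-length scan (alternative decomposition, not faster).

-- ===== PORT A =====
-- literal transliteration: build a dict of per-character counts, then scan its items for the largest value > 1
def count_repeats (string : String) : Int :=
  let repeated_dic := string.toList.foldl
    (fun (d : PySem.Dict Char Int) each_character =>
      if d.contains each_character then d.insert each_character (d.getD each_character 0 + 1)
      else d.insert each_character 1)
    PySem.Dict.empty
  repeated_dic.items.foldl
    (fun most_repeated_count kv =>
      if kv.2 > 1 then (if kv.2 > most_repeated_count then kv.2 else most_repeated_count)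
      else most_repeated_count)
    0

-- ===== PORT B =====
-- literal transliteration of Source B: sort the characters, scan runs of equal characters keeping the longest
def count_repeats_alt (string : String) : Int :=
  let st := (PySem.List.sorted string.toList (fun c => c) false).foldl
    (fun (s : Int × Int × Option Char) ch =>
      if s.2.2 = some ch then
        (if s.2.1 + 1 > s.1 then s.2.1 + 1 else s.1, s.2.1 + 1, s.2.2)
      else
        (if 1 > s.1 then 1 else s.1, 1, some ch))
    (0, 0, none)
  if st.1 > 1 then st.1 else 0

-- ===== PRECONDITION & SPEC =====
def Spec_count_repeats (string : String) (out : Int) : Prop := out = count_repeats_alt string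
instance (string : String) (out : Int) : Decidable (Spec_count_repeats string out) := by unfold Spec_count_repeats; infer_instance

-- ===== CLAIM (what is proved, stated in full; the proofs are below) =====
def Claim_equal_count_repeats : Prop := ∀ (string : String), Dom_count_repeats string → Spec_count_repeats string (count_repeats string)

-- ===== LEMMAS AND PROOFS =====

-- the maximum character count of a list, as both programs determine it
def pvM (l : List Char) : Int :=
  ((PySem.List.dedup l).map (fun k => (l.count k : Int))).foldl max 0

-- best run length reachable by B's scan from state (run, prev = c)
def pvR : List Char → Int → Char → Int
  | [], run, _ => run
  | x :: t, run, c => if x = c then pvR t (run + 1) c else max run (pvR t 1 x)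

-- best run length of a whole scan started fresh
def pvS : List Char → Int
  | [] => 0
  | x :: t => pvR t 1 x

theorem pvR_ge (l : List Char) (run : Int) (c : Char) : run ≤ pvR l run c := by
  induction l generalizing run c with
  | nil => simp [pvR]
  | cons x t ih =>
    simp only [pvR]
    split
    · exact le_trans (by omega) (ih (run + 1) c)
    · exact le_max_left _ _

theorem pvR_pos (l : List Char) (run : Int) (c : Char) (h : 1 ≤ run) : 1 ≤ pvR l run c := by
  exact le_trans h (pvR_ge l run c)

-- B's fold from a seen-prefix state computes max best (pvR …)
theorem foldB_eq (l : List Char) (best run : Int) (c : Char) (hbr : run ≤ best) :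
    (l.foldl
      (fun (s : Int × Int × Option Char) ch =>
        if s.2.2 = some ch then
          (if s.2.1 + 1 > s.1 then s.2.1 + 1 else s.1, s.2.1 + 1, s.2.2)
        else
          (if 1 > s.1 then 1 else s.1, 1, some ch))
      (best, run, some c)).1 = max best (pvR l run c) := by
  induction l generalizing best run c with
  | nil => simp [pvR]; omega
  | cons x t ih =>
    simp only [List.foldl_cons, pvR]
    by_cases hxc : x = c
    · subst hxc
      simp only [if_true]
      rw [ih _ _ _ (by omega)]
      have := pvR_ge t (run + 1) x
      split <;> omega
    · have hne : ¬ (some c = some x) := by simpa using fun h => hxc h.symm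
      rw [if_neg hne, if_neg hxc]
      rw [ih (if 1 > best then 1 else best) 1 x (by split <;> omega)]
      have := pvR_pos t 1 x (le_refl 1)
      split <;> omega

theorem maxfold_le_of_subset (xs ys : List Int) (h : ∀ v ∈ xs, v ∈ ys) :
    xs.foldl max 0 ≤ ys.foldl max 0 := by
  rcases PySem.List.foldl_max_mem xs 0 with h0 | hmem
  · rw [h0]; exact (PySem.List.le_foldl_max ys 0).1
  · exact (PySem.List.le_foldl_max ys 0).2 _ (h _ hmem)

theorem pvM_nonneg (l : List Char) : 0 ≤ pvM l := by
  exact (PySem.List.le_foldl_max _ 0).1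

theorem count_le_pvM (l : List Char) (k : Char) (hk : k ∈ l) : (l.count k : Int) ≤ pvM l := by
  refine (PySem.List.le_foldl_max _ 0).2 _ ?_
  exact List.mem_map.mpr ⟨k, (PySem.List.mem_dedup _ _).mpr hk, rfl⟩

theorem pvM_cases (l : List Char) : pvM l = 0 ∨ ∃ k ∈ l, pvM l = (l.count k : Int) := by
  rcases PySem.List.foldl_max_mem ((PySem.List.dedup l).map (fun k => (l.count k : Int))) 0 with h0 | hmem
  · exact Or.inl h0
  · rcases List.mem_map.mp hmem with ⟨k, hk, hv⟩
    exact Or.inr ⟨k, (PySem.List.mem_dedup _ _).mp hk, hv.symm⟩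

-- on a sorted tail, pvR splits into the current run and a fresh scan after it
theorem sortedR (t : List Char) (c : Char) (run : Int) (hrun : 0 ≤ run)
    (hs : (c :: t).Pairwise (· ≤ ·)) :
    pvR t run c = max (run + (t.count c : Int)) (pvS (t.dropWhile (fun x => x == c))) := by
  induction t generalizing run c with
  | nil => simp [pvR, pvS]; omega
  | cons x t ih =>
    rcases List.pairwise_cons.mp hs with ⟨hc, hxt⟩
    by_cases hxc : x = c
    · subst hxc
      have hs' : (x :: t).Pairwise (· ≤ ·) := hxt
      simp only [pvR, if_true, List.dropWhile_cons, BEq.rfl, List.count_cons_self]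
      rw [ih x (run + 1) (by omega) hs']
      push_cast
      omega
    · have hlt : c < x := lt_of_le_of_ne (hc x (by simp)) (fun h => hxc h.symm)
      have hnot : c ∉ x :: t := by
        intro hmem
        rcases List.mem_cons.mp hmem with h | h
        · exact hxc h.symm
        · rcases List.pairwise_cons.mp hxt with ⟨hx2, _⟩
          exact absurd (hx2 c h) (not_le.mpr hlt)
      have hcnt : (x :: t).count c = 0 := List.count_eq_zero.mpr hnot
      have hdw : (x :: t).dropWhile (fun y => y == c) = x :: t := by
        rw [List.dropWhile_cons_of_neg (by simpa using hxc)]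
      rw [hcnt, hdw]
      simp only [pvR, if_neg hxc, pvS]
      omega

-- on a sorted c :: t, the max count splits into count of c and the max count after the c-block
theorem pvM_split (c : Char) (t : List Char) (hs : (c :: t).Pairwise (· ≤ ·)) :
    pvM (c :: t) = max (((c :: t).count c : Int)) (pvM (t.dropWhile (fun x => x == c))) := by
  rcases List.pairwise_cons.mp hs with ⟨hc, ht⟩
  have htw : t = t.takeWhile (fun x => x == c) ++ t.dropWhile (fun x => x == c) :=
    (List.takeWhile_append_dropWhile).symm
  have htw_mem : ∀ y ∈ t.takeWhile (fun x => x == c), y = c := by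
    intro y hy
    have := List.mem_takeWhile_imp hy
    simpa using this
  have hu_sub : ∀ y ∈ t.dropWhile (fun x => x == c), y ∈ t :=
    fun y hy => (List.dropWhile_sublist _).mem hy
  have hcu : c ∉ t.dropWhile (fun x => x == c) := by
    intro hmem
    cases hx : t.dropWhile (fun x => x == c) with
    | nil => rw [hx] at hmem; exact absurd hmem (List.not_mem_nil)
    | cons x u' =>
      have hxne : ¬ (x == c) = true := by
        have h := List.head?_dropWhile_not (fun x => x == c) t
        rw [hx] at h
        simpa using h
      have hxt : x ∈ t := hu_sub x (by rw [hx]; simp)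
      rw [hx] at hmem
      rcases List.mem_cons.mp hmem with h | h
      · exact hxne (by simp [h])
      · have hpu : (x :: u').Pairwise (· ≤ ·) := by
          rw [← hx]
          exact ht.sublist (List.dropWhile_sublist _)
        have hxc : x ≤ c := (List.pairwise_cons.mp hpu).1 c h
        have hcx : c ≤ x := hc x hxt
        exact hxne (by simp [le_antisymm hxc hcx])
  have hcount : ∀ k, k ≠ c → (c :: t).count k = (t.dropWhile (fun x => x == c)).count k := by
    intro k hk
    have h0 : (t.takeWhile (fun x => x == c)).count k = 0 := by
      apply List.count_eq_zero.mpr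
      intro hmem
      exact hk (htw_mem k hmem)
    calc (c :: t).count k = t.count k := by simp [Ne.symm hk]
    _ = (t.takeWhile (fun x => x == c)).count k + (t.dropWhile (fun x => x == c)).count k := by
          conv_lhs => rw [htw]
          rw [List.count_append]
    _ = (t.dropWhile (fun x => x == c)).count k := by omega
  have hmemu : ∀ k, k ∈ (c :: t) → k ≠ c → k ∈ t.dropWhile (fun x => x == c) := by
    intro k hkmem hk
    rcases List.mem_cons.mp hkmem with h | h
    · exact absurd h hk
    · rw [htw] at h
      rcases List.mem_append.mp h with h | h
      · exact absurd (htw_mem k h) hk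
      · exact h
  apply le_antisymm
  · rcases pvM_cases (c :: t) with h0 | ⟨k, hk, hv⟩
    · rw [h0]
      exact le_max_of_le_left (by positivity)
    · rw [hv]
      by_cases hkc : k = c
      · subst hkc; exact le_max_left _ _
      · rw [hcount k hkc]
        exact le_max_of_le_right (count_le_pvM _ k (hmemu k hk hkc))
  · apply max_le
    · exact count_le_pvM _ c (by simp)
    · rcases pvM_cases (t.dropWhile (fun x => x == c)) with h0 | ⟨k, hk, hv⟩
      · rw [h0]; exact pvM_nonneg _
      · rw [hv]
        have hkc : k ≠ c := fun h => hcu (h ▸ hk)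
        rw [← hcount k hkc]
        exact count_le_pvM _ k (List.mem_cons_of_mem _ (hu_sub k hk))

theorem pvS_sorted (l : List Char) (hs : l.Pairwise (· ≤ ·)) : pvS l = pvM l := by
  induction hn : l.length using Nat.strong_induction_on generalizing l with
  | _ n ih =>
    cases l with
    | nil => simp [pvS, pvM, PySem.List.dedup]
    | cons c t =>
      have ht : t.Pairwise (· ≤ ·) := (List.pairwise_cons.mp hs).2
      have hu : (t.dropWhile (fun x => x == c)).Pairwise (· ≤ ·) :=
        ht.sublist (List.dropWhile_sublist _)
      have hlen : (t.dropWhile (fun x => x == c)).length < n := by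
        have := List.length_dropWhile_le (fun x => x == c) t
        simp at hn
        omega
      have hrec := ih _ hlen _ hu rfl
      show pvR t 1 c = pvM (c :: t)
      rw [sortedR t c 1 (by omega) hs, hrec, pvM_split c t hs, List.count_cons_self]
      push_cast
      omega

theorem pvM_perm (l l' : List Char) (h : l.Perm l') : pvM l = pvM l' := by
  have key : ∀ (a b : List Char), a.Perm b → pvM a ≤ pvM b := by
    intro a b hab
    apply maxfold_le_of_subset
    intro v hv
    rcases List.mem_map.mp hv with ⟨k, hk, hkv⟩
    apply List.mem_map.mpr
    refine ⟨k, ?_, ?_⟩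
    · exact (PySem.List.mem_dedup _ _).mpr (hab.mem_iff.mp ((PySem.List.mem_dedup _ _).mp hk))
    · rw [← hkv]
      simp [hab.count_eq]
  exact le_antisymm (key _ _ h) (key _ _ h.symm)

theorem foldl_max_shift (l : List Int) (a b : Int) :
    l.foldl max (max a b) = max a (l.foldl max b) := by
  induction l generalizing b with
  | nil => rfl
  | cons x l ih =>
    simp only [List.foldl_cons]
    rw [max_assoc, ih]

-- A's threshold fold over values equals the thresholded maximum
theorem threshold_fold (vs : List Int) (acc : Int) (hacc : 0 ≤ acc) :
    vs.foldl (fun a v => if v > 1 then (if v > a then v else a) else a) acc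
      = max acc ((vs.filter (fun v => decide (1 < v))).foldl max 0) := by
  induction vs generalizing acc with
  | nil => simp; omega
  | cons v vs ih =>
    simp only [List.foldl_cons, List.filter_cons]
    by_cases hv : 1 < v
    · have h1 : (if v > 1 then (if v > acc then v else acc) else acc) = max acc v := by
        split_ifs <;> omega
      rw [h1, if_pos (by simpa using hv), ih (max acc v) (by omega)]
      simp only [List.foldl_cons]
      have h2 : max (0 : Int) v = max v 0 := by omega
      rw [h2, foldl_max_shift]
      omega
    · have h1 : (if v > 1 then (if v > acc then v else acc) else acc) = acc := by
        split_ifs <;> omega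
      rw [h1, if_neg (by simpa using hv), ih acc hacc]

theorem filter_max (vs : List Int) :
    (vs.filter (fun v => decide (1 < v))).foldl max 0
      = if vs.foldl max 0 > 1 then vs.foldl max 0 else 0 := by
  have hle := PySem.List.le_foldl_max vs 0
  have hfle := PySem.List.le_foldl_max (vs.filter (fun v => decide (1 < v))) 0
  by_cases hm : vs.foldl max 0 > 1
  · rw [if_pos hm]
    apply le_antisymm
    · rcases PySem.List.foldl_max_mem (vs.filter (fun v => decide (1 < v))) 0 with h0 | hmem
      · omega
      · exact hle.2 _ (List.mem_of_mem_filter hmem)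
    · apply hfle.2
      apply List.mem_filter.mpr
      refine ⟨?_, by simpa using hm⟩
      rcases PySem.List.foldl_max_mem vs 0 with h0 | hmem
      · omega
      · exact hmem
  · rw [if_neg hm]
    rcases PySem.List.foldl_max_mem (vs.filter (fun v => decide (1 < v))) 0 with h0 | hmem
    · exact h0
    · have h1 : (1 : Int) < (vs.filter (fun v => decide (1 < v))).foldl max 0 := by
        have := List.mem_filter.mp hmem
        have h2 := hle.2 _ this.1
        simp at this
        omega
      have h2 := hle.2 _ (List.mem_of_mem_filter hmem)
      omega

theorem countA (s : String) : count_repeats s = if pvM s.toList > 1 then pvM s.toList else 0 := by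
  unfold count_repeats
  rw [PySem.List.foldl_congr_mem s.toList _
    (fun (d : PySem.Dict Char Int) x => d.insert x (d.getD x 0 + 1)) _ ?_]
  · rw [PySem.Dict.foldl_insert_getD_add_one_eq_counter]
    simp only [PySem.Dict.items_counter, ← PySem.List.dedup_eq_ofList, List.foldl_map]
    have h := threshold_fold ((PySem.List.dedup s.toList).map (fun k => (s.toList.count k : Int)))
      0 (le_refl 0)
    rw [List.foldl_map] at h
    rw [h, filter_max]
    have : (0 : Int) ≤ pvM s.toList := pvM_nonneg s.toList
    unfold pvM
    split <;> omega
  · intro d x _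
    show (if d.contains x then d.insert x (d.getD x 0 + 1) else d.insert x 1)
        = d.insert x (d.getD x 0 + 1)
    by_cases h : d.contains x
    · rw [if_pos h]
    · rw [if_neg h, PySem.Dict.getD_of_not_contains d 0 (by simpa using h)]
      norm_num

theorem countB (s : String) : count_repeats_alt s = if pvM s.toList > 1 then pvM s.toList else 0 := by
  unfold count_repeats_alt
  have hperm := PySem.List.sorted_perm s.toList (fun c => c) false
  have hpair : (PySem.List.sorted s.toList (fun c => c) false).Pairwise (· ≤ ·) := by
    simpa using PySem.List.sorted_pairwise s.toList (fun c => c)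
  have hM : pvM (PySem.List.sorted s.toList (fun c => c) false) = pvM s.toList :=
    pvM_perm _ _ hperm
  rw [← hM]
  cases hl : PySem.List.sorted s.toList (fun c => c) false with
  | nil => simp [pvM, PySem.List.dedup]
  | cons x t =>
    rw [hl] at hpair hM
    simp only [List.foldl_cons]
    rw [show ((if (none : Option Char) = some x then
        ((if (0 : Int) + 1 > 0 then (0 : Int) + 1 else 0, (0 : Int) + 1, (none : Option Char)))
        else ((if (1 : Int) > 0 then (1 : Int) else 0, (1 : Int), some x)))
        = ((1 : Int), (1 : Int), some x)) from by norm_num]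
    rw [foldB_eq t 1 1 x (le_refl 1)]
    have h1 : max 1 (pvR t 1 x) = pvR t 1 x := by
      have := pvR_pos t 1 x (le_refl 1)
      omega
    rw [h1]
    have h2 : pvR t 1 x = pvM (x :: t) := pvS_sorted (x :: t) hpair
    rw [h2]

-- ===== VERDICT (by name: the statement is the Claim_ definition above) =====
theorem count_repeats_spec : Claim_equal_count_repeats := by
  intro s _
  unfold Spec_count_repeats
  rw [countA, countB]
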